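-- pv_equiv track=rewrite | github.com/wesc111/sudoku_2025_1 | _archive/test_removeHiddenDoubles.py | getPerm2Hit
-- ===== SOURCE A (Python) =====
-- def getPerm2():
--     """generate a list of all relevant 2-er permutations of a,b"""
--     a=[1,2,3,4,5,6,7,8,9]
--     retVal=[]
--     for i in range(0,9):
--         for j in range(i,9):
--             if i!=j:
--                 perm = [a[i],a[j]]
--                 pp=list(perm)
--                 pp.sort()
--                 retVal.append(pp)
--     return retVal
--
-- def getPerm2Hit(candidateList):
--     """check 2-er permutations that are inside of candidateList:
--     if a 2-er permutation is included exactly 2 times, the value is added to the return list retVal"""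
--     retVal=[]
--     allPermList = getPerm2()
--     for perm in allPermList:
--         count = 0
--         for cc in candidateList:
--             if (perm[0] in cc) and (perm[1] in cc):
--                 count += 1
--         if count==2 and countOccurenceInList(candidateList,perm[0])==2 and countOccurenceInList(candidateList,perm[1])==2:
--             retVal.append(perm)
--     return retVal
--
-- def countOccurenceInList(candidateList, number):
--     """how often is the number included in the candidateList"""
--     count = 0
--     for elem in candidateList:
--         if number in elem:  count += 1
--     return count
-- ===== SOURCE B (Python) =====
-- def getPerm2Hit(candidateList):
--     """One indexing pass: count, per value and per sorted pair, the cells containing it;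
--     then emit the 36 pairs (x<y in 1..9) whose pair count and both value counts are 2."""
--     numCount = {}
--     pairCount = {}
--     for cell in candidateList:
--         vs = sorted(v for v in set(cell) if 1 <= v <= 9)
--         for idx, x in enumerate(vs):
--             numCount[x] = numCount.get(x, 0) + 1
--             for y in vs[idx + 1:]:
--                 pairCount[(x, y)] = pairCount.get((x, y), 0) + 1
--     retVal = []
--     for x in range(1, 10):
--         for y in range(x + 1, 10):
--             if pairCount.get((x, y), 0) == 2 and numCount.get(x, 0) == 2 and numCount.get(y, 0) == 2:
--                 retVal.append([x, y])
--     return retVal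
-- ===== Notes on version B (the rewrite author's own statement) =====
-- stated objective: faster
-- what changed: Replaces the 36 nested scans of candidateList (plus two countOccurenceInList re-scans per pair) by one indexing pass that builds per-value and per-pair cell-membership counters, followed by a constant-size loop over the 36 pairs in the same order.
import Mathlib
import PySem

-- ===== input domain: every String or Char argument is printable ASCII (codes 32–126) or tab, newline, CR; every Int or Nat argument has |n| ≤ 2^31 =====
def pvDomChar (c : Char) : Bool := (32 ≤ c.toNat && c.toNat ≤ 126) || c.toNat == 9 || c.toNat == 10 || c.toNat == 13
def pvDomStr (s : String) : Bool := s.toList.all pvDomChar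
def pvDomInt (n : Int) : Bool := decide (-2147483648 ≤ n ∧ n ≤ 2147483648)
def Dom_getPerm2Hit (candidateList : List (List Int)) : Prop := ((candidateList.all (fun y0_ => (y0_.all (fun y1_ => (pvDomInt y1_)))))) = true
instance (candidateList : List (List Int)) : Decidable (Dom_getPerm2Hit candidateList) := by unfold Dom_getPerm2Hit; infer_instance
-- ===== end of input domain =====

-- B replaces A's 36 repeated scans of candidateList by one counting pass plus a constant
-- loop over the 36 pairs (objective: alternative decomposition, same output).


-- ===== PORT A =====
-- a[i] / a[j]: i, j run over 0..8 and a has 9 elements, always in range, so pyGetD is exact.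
def getPerm2 : List (List Int) :=
  let a : List Int := [1, 2, 3, 4, 5, 6, 7, 8, 9]
  (PySem.List.pyRange 0 9 1).foldl (fun retVal i =>
    (PySem.List.pyRange i 9 1).foldl (fun retVal j =>
      if i ≠ j then
        let perm : List Int := [PySem.List.pyGetD a i 0, PySem.List.pyGetD a j 0]
        let pp := PySem.List.sorted perm (fun v => v) false
        retVal ++ [pp]
      else retVal) retVal) []

def countOccurenceInList (candidateList : List (List Int)) (number : Int) : Int :=
  candidateList.foldl (fun count elem => if number ∈ elem then count + 1 else count) 0

def getPerm2Hit (candidateList : List (List Int)) : List (List Int) :=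
  getPerm2.foldl (fun retVal perm =>
    let p0 := PySem.List.pyGetD perm 0 0
    let p1 := PySem.List.pyGetD perm 1 0
    let count : Int := candidateList.foldl (fun c cc => if p0 ∈ cc ∧ p1 ∈ cc then c + 1 else c) 0
    if count = 2 ∧ countOccurenceInList candidateList p0 = 2 ∧
        countOccurenceInList candidateList p1 = 2 then
      retVal ++ [perm]
    else retVal) []

-- ===== PORT B =====
-- one cell's inner loops of Source B: 'for idx, x in enumerate(vs): … for y in vs[idx+1:]: …'
-- as head/tail recursion over vs (vs[idx+1:] is exactly the tail after x);
-- vs = sorted(v for v in set(cell) if 1 <= v <= 9).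
def procCell : List Int → PySem.Dict Int Int × PySem.Dict (Int × Int) Int →
    PySem.Dict Int Int × PySem.Dict (Int × Int) Int
  | [], st => st
  | x :: rest, (nc, pc) =>
    let nc := nc.insert x (nc.getD x 0 + 1)
    let pc := rest.foldl (fun pc y => pc.insert (x, y) (pc.getD (x, y) 0 + 1)) pc
    procCell rest (nc, pc)

def getPerm2Hit_alt (candidateList : List (List Int)) : List (List Int) :=
  let st := candidateList.foldl (fun st cell =>
      procCell (PySem.List.sorted
        ((PySem.Set.ofList cell).filter (fun v => decide (1 ≤ v ∧ v ≤ 9)))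
        (fun v => v) false) st)
    (PySem.Dict.empty, PySem.Dict.empty)
  let nc := st.1
  let pc := st.2
  (PySem.List.pyRange 1 10 1).foldl (fun retVal x =>
    (PySem.List.pyRange (x + 1) 10 1).foldl (fun retVal y =>
      if pc.getD (x, y) 0 = 2 ∧ nc.getD x 0 = 2 ∧ nc.getD y 0 = 2 then
        retVal ++ [[x, y]]
      else retVal) retVal) []

-- ===== PRECONDITION & SPEC =====
def Spec_getPerm2Hit (candidateList : List (List Int)) (out : List (List Int)) : Prop := out = getPerm2Hit_alt candidateList
instance (candidateList : List (List Int)) (out : List (List Int)) : Decidable (Spec_getPerm2Hit candidateList out) := by unfold Spec_getPerm2Hit; infer_instance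

-- ===== CLAIM (what is proved, stated in full; the proofs are below) =====
def Claim_equal_getPerm2Hit : Prop := ∀ (candidateList : List (List Int)), Dom_getPerm2Hit candidateList → Spec_getPerm2Hit candidateList (getPerm2Hit candidateList)

-- ===== LEMMAS AND PROOFS =====

/-- A's inner per-pair cell count, named for the proofs. -/
def cntBoth (cl : List (List Int)) (x y : Int) : Int :=
  cl.foldl (fun c cc => if x ∈ cc ∧ y ∈ cc then c + 1 else c) 0

/-- the 36 pairs, in the order both programs visit them. -/
def pairs36 : List (Int × Int) :=
  [(1,2),(1,3),(1,4),(1,5),(1,6),(1,7),(1,8),(1,9),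
   (2,3),(2,4),(2,5),(2,6),(2,7),(2,8),(2,9),
   (3,4),(3,5),(3,6),(3,7),(3,8),(3,9),
   (4,5),(4,6),(4,7),(4,8),(4,9),
   (5,6),(5,7),(5,8),(5,9),
   (6,7),(6,8),(6,9),
   (7,8),(7,9),
   (8,9)]

def stepA (cl : List (List Int)) (r : List (List Int)) (p : Int × Int) : List (List Int) :=
  if cntBoth cl p.1 p.2 = 2 ∧ countOccurenceInList cl p.1 = 2 ∧ countOccurenceInList cl p.2 = 2
  then r ++ [[p.1, p.2]] else r

def stepB (nc : PySem.Dict Int Int) (pc : PySem.Dict (Int × Int) Int)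
    (r : List (List Int)) (p : Int × Int) : List (List Int) :=
  if pc.getD p 0 = 2 ∧ nc.getD p.1 0 = 2 ∧ nc.getD p.2 0 = 2
  then r ++ [[p.1, p.2]] else r

def buildSt (cl : List (List Int)) : PySem.Dict Int Int × PySem.Dict (Int × Int) Int :=
  cl.foldl (fun st cell =>
      procCell (PySem.List.sorted
        ((PySem.Set.ofList cell).filter (fun v => decide (1 ≤ v ∧ v ≤ 9)))
        (fun v => v) false) st)
    (PySem.Dict.empty, PySem.Dict.empty)

lemma getPerm2_eq : getPerm2 = pairs36.map (fun p => [p.1, p.2]) := by decide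

lemma A_as_pairs (cl : List (List Int)) :
    getPerm2Hit cl = pairs36.foldl (stepA cl) [] := by
  unfold getPerm2Hit
  rw [getPerm2_eq, List.foldl_map]
  rfl

lemma Bfold (nc : PySem.Dict Int Int) (pc : PySem.Dict (Int × Int) Int) :
    (PySem.List.pyRange 1 10 1).foldl (fun retVal x =>
      (PySem.List.pyRange (x + 1) 10 1).foldl (fun retVal y =>
        if pc.getD (x, y) 0 = 2 ∧ nc.getD x 0 = 2 ∧ nc.getD y 0 = 2 then
          retVal ++ [[x, y]]
        else retVal) retVal) []
    = pairs36.foldl (stepB nc pc) [] := by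
  rw [show PySem.List.pyRange 1 10 1 = [1,2,3,4,5,6,7,8,9] from by decide]
  simp only [List.foldl_cons, List.foldl_nil]
  rw [show PySem.List.pyRange ((1:Int) + 1) 10 1 = [2,3,4,5,6,7,8,9] from by decide,
      show PySem.List.pyRange ((2:Int) + 1) 10 1 = [3,4,5,6,7,8,9] from by decide,
      show PySem.List.pyRange ((3:Int) + 1) 10 1 = [4,5,6,7,8,9] from by decide,
      show PySem.List.pyRange ((4:Int) + 1) 10 1 = [5,6,7,8,9] from by decide,
      show PySem.List.pyRange ((5:Int) + 1) 10 1 = [6,7,8,9] from by decide,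
      show PySem.List.pyRange ((6:Int) + 1) 10 1 = [7,8,9] from by decide,
      show PySem.List.pyRange ((7:Int) + 1) 10 1 = [8,9] from by decide,
      show PySem.List.pyRange ((8:Int) + 1) 10 1 = [9] from by decide,
      show PySem.List.pyRange ((9:Int) + 1) 10 1 = [] from by decide]
  rfl

lemma B_as_pairs (cl : List (List Int)) :
    getPerm2Hit_alt cl = pairs36.foldl (stepB (buildSt cl).1 (buildSt cl).2) [] :=
  Bfold (buildSt cl).1 (buildSt cl).2

lemma foldl_count_shift (P : List Int → Prop) [DecidablePred P] (l : List (List Int)) (n : Int) :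
    l.foldl (fun c e => if P e then c + 1 else c) n
      = n + l.foldl (fun c e => if P e then c + 1 else c) 0 := by
  induction l generalizing n with
  | nil => simp
  | cons c l ih =>
    simp only [List.foldl_cons]
    rw [ih, ih (if P c then 0 + 1 else 0)]
    split_ifs <;> omega

lemma inner_getD (r : List Int) (pc : PySem.Dict (Int × Int) Int) (v x y : Int) :
    (r.foldl (fun pc y' => pc.insert (v, y') (pc.getD (v, y') 0 + 1)) pc).getD (x, y) 0
      = pc.getD (x, y) 0 + (if x = v then (r.count y : Int) else 0) := by
  induction r generalizing pc with
  | nil => simp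
  | cons y' r ih =>
    simp only [List.foldl_cons]
    rw [ih, PySem.Dict.getD_insert]
    by_cases he : (x, y) = (v, y')
    · obtain ⟨hx, hy⟩ := Prod.ext_iff.mp he
      subst hx
      subst hy
      rw [if_pos he, if_pos rfl, if_pos rfl, List.count_cons_self]
      push_cast
      ring
    · rw [if_neg he]
      by_cases hx : x = v
      · have hy : y ≠ y' := by
          intro h
          exact he (by rw [hx, h])
        rw [if_pos hx, if_pos hx]
        simp [Ne.symm hy]
      · rw [if_neg hx, if_neg hx]

lemma procCell_nc (vs : List Int) (nc : PySem.Dict Int Int) (pc : PySem.Dict (Int × Int) Int)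
    (x : Int) :
    (procCell vs (nc, pc)).1.getD x 0 = nc.getD x 0 + (vs.count x : Int) := by
  induction vs generalizing nc pc with
  | nil => simp [procCell]
  | cons v r ih =>
    simp only [procCell]
    rw [ih, PySem.Dict.getD_insert]
    by_cases hx : x = v
    · rw [if_pos hx, hx, List.count_cons_self]
      push_cast
      ring
    · rw [if_neg hx, List.count_cons_of_ne (fun h => hx h.symm)]

lemma procCell_pc (vs : List Int) (h : vs.Pairwise (· < ·)) (nc : PySem.Dict Int Int)
    (pc : PySem.Dict (Int × Int) Int) (x y : Int) :
    (procCell vs (nc, pc)).2.getD (x, y) 0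
      = pc.getD (x, y) 0 + (if x ∈ vs ∧ y ∈ vs ∧ x < y then 1 else 0) := by
  induction vs generalizing nc pc with
  | nil => simp [procCell]
  | cons v r ih =>
    have hv : ∀ z ∈ r, v < z := (List.pairwise_cons.mp h).1
    have hr : r.Pairwise (· < ·) := (List.pairwise_cons.mp h).2
    have hnd : r.Nodup := hr.imp ne_of_lt
    simp only [procCell]
    rw [ih hr, inner_getD]
    by_cases hx : x = v
    · have hxr : x ∉ r := fun hm => lt_irrefl v (hx ▸ hv x hm)
      rw [if_pos hx, if_neg (fun hc : x ∈ r ∧ y ∈ r ∧ x < y => hxr hc.1)]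
      by_cases hy : y ∈ r
      · have hcond : x ∈ v :: r ∧ y ∈ v :: r ∧ x < y :=
          ⟨hx ▸ List.mem_cons_self, List.mem_cons_of_mem _ hy, hx ▸ hv y hy⟩
        rw [if_pos hcond, List.count_eq_one_of_mem hnd hy]
        push_cast
        ring
      · have hcond : ¬ (x ∈ v :: r ∧ y ∈ v :: r ∧ x < y) := by
          rintro ⟨-, hy1, hlt⟩
          rcases List.mem_cons.mp hy1 with h1 | h1
          · omega
          · exact hy h1
        rw [if_neg hcond, List.count_eq_zero_of_not_mem hy]
        push_cast
        ring
    · have hm : (x ∈ v :: r ∧ y ∈ v :: r ∧ x < y) ↔ (x ∈ r ∧ y ∈ r ∧ x < y) := by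
        constructor
        · rintro ⟨hx1, hy1, hlt⟩
          rcases List.mem_cons.mp hx1 with h1 | h1
          · exact absurd h1 hx
          rcases List.mem_cons.mp hy1 with h2 | h2
          · exact absurd (h2 ▸ hlt) (not_lt.mpr (le_of_lt (hv x h1)))
          · exact ⟨h1, h2, hlt⟩
        · rintro ⟨hx1, hy1, hlt⟩
          exact ⟨List.mem_cons_of_mem _ hx1, List.mem_cons_of_mem _ hy1, hlt⟩
      rw [if_neg hx, if_congr hm.symm rfl rfl]
      ring

lemma countOcc_cons (c : List Int) (cl : List (List Int)) (x : Int) :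
    countOccurenceInList (c :: cl) x
      = (if x ∈ c then 1 else 0) + countOccurenceInList cl x := by
  unfold countOccurenceInList
  rw [List.foldl_cons,
    foldl_count_shift (fun e => x ∈ e) cl (if x ∈ c then (0 : Int) + 1 else 0)]
  split_ifs <;> omega

lemma cntBoth_cons (c : List Int) (cl : List (List Int)) (x y : Int) :
    cntBoth (c :: cl) x y
      = (if x ∈ c ∧ y ∈ c then 1 else 0) + cntBoth cl x y := by
  unfold cntBoth
  rw [List.foldl_cons,
    foldl_count_shift (fun e => x ∈ e ∧ y ∈ e) cl (if x ∈ c ∧ y ∈ c then (0 : Int) + 1 else 0)]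
  split_ifs <;> omega

lemma build_spec (cl : List (List Int)) :
    ∀ (nc : PySem.Dict Int Int) (pc : PySem.Dict (Int × Int) Int),
      (∀ x, 1 ≤ x → x ≤ 9 → ((cl.foldl (fun st cell =>
          procCell (PySem.List.sorted
            ((PySem.Set.ofList cell).filter (fun v => decide (1 ≤ v ∧ v ≤ 9)))
            (fun v => v) false) st)
          (nc, pc)).1).getD x 0 = nc.getD x 0 + countOccurenceInList cl x)
      ∧ (∀ x y, 1 ≤ x → x < y → y ≤ 9 → ((cl.foldl (fun st cell =>
          procCell (PySem.List.sorted
            ((PySem.Set.ofList cell).filter (fun v => decide (1 ≤ v ∧ v ≤ 9)))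
            (fun v => v) false) st)
          (nc, pc)).2).getD (x, y) 0 = pc.getD (x, y) 0 + cntBoth cl x y) := by
  induction cl with
  | nil => intro nc pc; constructor <;> simp [countOccurenceInList, cntBoth]
  | cons c cl ih =>
    intro nc pc
    have hnd0 : ((PySem.Set.ofList c).filter (fun v => decide (1 ≤ v ∧ v ≤ 9))).Nodup :=
      (PySem.Set.nodup_ofList c).filter _
    set fl := (PySem.Set.ofList c).filter (fun v => decide (1 ≤ v ∧ v ≤ 9)) with hfl
    set vs := PySem.List.sorted fl (fun v => v) false with hvs
    have hperm : vs.Perm fl := PySem.List.sorted_perm fl (fun v => v) false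
    have hnd : vs.Nodup := hperm.symm.nodup hnd0
    have hple : vs.Pairwise (fun a b => a ≤ b) := PySem.List.sorted_pairwise fl (fun v => v)
    have hpw : vs.Pairwise (· < ·) :=
      (hple.and hnd).imp (fun h => lt_of_le_of_ne h.1 h.2)
    have hmem : ∀ z, z ∈ vs ↔ z ∈ c ∧ 1 ≤ z ∧ z ≤ 9 := by
      intro z
      rw [PySem.List.mem_sorted, hfl, List.mem_filter, PySem.Set.mem_ofList]
      simp
    have hcount : ∀ z, (vs.count z : Int) = (if z ∈ c ∧ 1 ≤ z ∧ z ≤ 9 then 1 else 0) := by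
      intro z
      by_cases hz : z ∈ c ∧ 1 ≤ z ∧ z ≤ 9
      · rw [List.count_eq_one_of_mem hnd ((hmem z).mpr hz)]
        simp [hz]
      · rw [List.count_eq_zero_of_not_mem (fun hm => hz ((hmem z).mp hm))]
        simp [hz]
    have heta : procCell vs (nc, pc) =
        ((procCell vs (nc, pc)).1, (procCell vs (nc, pc)).2) := rfl
    constructor
    · intro x hx1 hx9
      simp only [List.foldl_cons]
      rw [heta, (ih _ _).1 x hx1 hx9, procCell_nc, hcount, countOcc_cons]
      have : (x ∈ c ∧ 1 ≤ x ∧ x ≤ 9) ↔ x ∈ c := by tauto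
      rw [if_congr this rfl rfl]
      ring
    · intro x y hx1 hxy hy9
      have hiff : (x ∈ vs ∧ y ∈ vs ∧ x < y) ↔ (x ∈ c ∧ y ∈ c) := by
        constructor
        · rintro ⟨h1, h2, -⟩
          exact ⟨((hmem x).mp h1).1, ((hmem y).mp h2).1⟩
        · rintro ⟨h1, h2⟩
          exact ⟨(hmem x).mpr ⟨h1, hx1, by omega⟩, (hmem y).mpr ⟨h2, by omega, hy9⟩, hxy⟩
      simp only [List.foldl_cons]
      rw [heta, (ih _ _).2 x y hx1 hxy hy9, procCell_pc vs hpw, cntBoth_cons,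
        if_congr hiff rfl rfl]
      ring

lemma pairs36_lt : ∀ p ∈ pairs36, 1 ≤ p.1 ∧ p.1 < p.2 ∧ p.2 ≤ 9 := by decide

-- ===== VERDICT (by name: the statement is the Claim_ definition above) =====
theorem getPerm2Hit_spec : Claim_equal_getPerm2Hit := by
  intro cl _
  unfold Spec_getPerm2Hit
  rw [A_as_pairs, B_as_pairs]
  apply PySem.List.foldl_congr_mem
  intro acc p hp
  obtain ⟨hb1, hlt, hb9⟩ := pairs36_lt p hp
  have h1 : (buildSt cl).1.getD p.1 0 = countOccurenceInList cl p.1 := by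
    have := (build_spec cl PySem.Dict.empty PySem.Dict.empty).1 p.1 hb1 (by omega)
    simpa [buildSt] using this
  have h2 : (buildSt cl).1.getD p.2 0 = countOccurenceInList cl p.2 := by
    have := (build_spec cl PySem.Dict.empty PySem.Dict.empty).1 p.2 (by omega) hb9
    simpa [buildSt] using this
  have h3 : (buildSt cl).2.getD p 0 = cntBoth cl p.1 p.2 := by
    have := (build_spec cl PySem.Dict.empty PySem.Dict.empty).2 p.1 p.2 hb1 hlt hb9
    simpa [buildSt] using this
  simp only [stepA, stepB, h1, h2, h3]
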